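-- pv_equiv track=rewrite | github.com/m-franc/kata | python/min_umbrellas.py | min_umbrellas
-- ===== SOURCE A (Python) =====
-- def min_umbrellas(weather):
--     where_are_umb = {"home" : 0,
--                      "work" : 0}
--     nb_umbrellas = 0
--     conditions = {"clear" : 0,
--                   "sunny" : 0,
--                   "cloudy" : 0,
--                   "overcast" : 0,
--                   "windy" : 0,
--                   "rainy" : 1,
--                   "thunderstorms" : 1}
--     for i, hd_weather in enumerate(weather):
--         if conditions[hd_weather] == 1:
--             if i % 2 == 0:
--                 if where_are_umb["home"] == 1:
--                     where_are_umb["home"] = 0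
--                     where_are_umb["work"] = 1
--                 else:
--                     nb_umbrellas += 1
--                     where_are_umb["work"] = 1
--             else:
--                 if where_are_umb["work"] == 1:
--                     where_are_umb["work"] = 0
--                     where_are_umb["home"] = 1
--                 else:
--                     nb_umbrellas += 1
--                     where_are_umb["home"] = 1
--     return nb_umbrellas
-- ===== SOURCE B (Python) =====
-- def min_umbrellas(weather):
--     conditions = {"clear": 0,
--                   "sunny": 0,
--                   "cloudy": 0,
--                   "overcast": 0,
--                   "windy": 0,
--                   "rainy": 1,
--                   "thunderstorms": 1}
--     # Stage 1: parities of the rainy days' positions.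
--     parities = [i % 2 for i, w in enumerate(weather) if conditions[w] == 1]
--     # Stage 2: an umbrella carried on a rainy day can be reused on the next
--     # rainy day exactly when the two days have opposite parity, so the answer
--     # is the number of rainy days minus the number of parity alternations.
--     return len(parities) - sum(1 for a, b in zip(parities, parities[1:]) if a != b)
-- ===== Notes on version B (the rewrite author's own statement) =====
-- stated objective: alternative
-- what changed: Replaces A's stateful simulation of two home/work umbrella flags by two staged passes: first a comprehension extracting the index parities of the rainy days, then a closed arithmetic count (number of rainy days minus number of adjacent parity alternations in that list).
import Mathlib
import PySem

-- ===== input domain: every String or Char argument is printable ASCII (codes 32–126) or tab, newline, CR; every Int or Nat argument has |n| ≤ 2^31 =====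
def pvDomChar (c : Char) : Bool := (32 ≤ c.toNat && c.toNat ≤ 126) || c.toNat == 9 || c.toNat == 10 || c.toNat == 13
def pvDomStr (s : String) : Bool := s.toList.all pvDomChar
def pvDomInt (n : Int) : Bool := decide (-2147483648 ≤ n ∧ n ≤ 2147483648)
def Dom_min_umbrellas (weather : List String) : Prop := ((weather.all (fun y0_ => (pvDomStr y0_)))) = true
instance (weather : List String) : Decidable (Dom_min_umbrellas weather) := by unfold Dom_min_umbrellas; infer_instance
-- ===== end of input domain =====

-- B replaces A's stateful two-flag simulation by two staged passes: extract the rainy days' index parities, then count umbrellas arithmetically as (#rainy days) - (#parity alternations).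


-- ===== PORT A =====
-- the 'conditions' dict of A
def pvConditionsA : PySem.Dict String Int :=
  PySem.Dict.ofList [("clear", 0), ("sunny", 0), ("cloudy", 0), ("overcast", 0),
                     ("windy", 0), ("rainy", 1), ("thunderstorms", 1)]

-- 'for i, hd_weather in enumerate(weather)' with state (home, work, nb_umbrellas).
-- conditions[hd_weather] raises KeyError for unknown strings (excluded by Pre_); getD 0 stands in there.
def pvLoopA : List String → Nat → Int → Int → Int → Int
  | [], _, _, _, nb => nb
  | w :: ws, i, home, work, nb =>
    if PySem.Dict.getD pvConditionsA w 0 = 1 then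
      if i % 2 = 0 then
        if home = 1 then pvLoopA ws (i + 1) 0 1 nb
        else pvLoopA ws (i + 1) home 1 (nb + 1)
      else
        if work = 1 then pvLoopA ws (i + 1) 1 0 nb
        else pvLoopA ws (i + 1) 1 work (nb + 1)
    else pvLoopA ws (i + 1) home work nb

def min_umbrellas (weather : List String) : Int :=
  pvLoopA weather 0 0 0 0

-- ===== PORT B =====
-- the 'conditions' dict of B
def pvConditionsB : PySem.Dict String Int :=
  PySem.Dict.ofList [("clear", 0), ("sunny", 0), ("cloudy", 0), ("overcast", 0),
                     ("windy", 0), ("rainy", 1), ("thunderstorms", 1)]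

-- '[i % 2 for i, w in enumerate(weather) if conditions[w] == 1]' (KeyError inputs excluded by Pre_)
def pvParities (weather : List String) : List Int :=
  (PySem.List.enumerate weather).filterMap
    (fun iw => if PySem.Dict.getD pvConditionsB iw.2 0 = 1 then some (iw.1 % 2) else none)

-- 'len(parities) - sum(1 for a, b in zip(parities, parities[1:]) if a != b)'
def min_umbrellas_alt (weather : List String) : Int :=
  let parities := pvParities weather
  (parities.length : Int) - ((parities.zip parities.tail).countP (fun ab => ab.1 != ab.2) : Int)

-- ===== PRECONDITION & SPEC =====
-- Pre_ excludes exactly the inputs where the Python raises KeyError: a weather string outside the seven keys.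
def Pre_min_umbrellas (weather : List String) : Prop :=
  ∀ w ∈ weather, w ∈ ["clear", "sunny", "cloudy", "overcast", "windy", "rainy", "thunderstorms"]
instance (weather : List String) : Decidable (Pre_min_umbrellas weather) := by
  unfold Pre_min_umbrellas; infer_instance

def pvWitness_min_umbrellas : List String := ["rainy", "clear", "thunderstorms"]

def Spec_min_umbrellas (weather : List String) (out : Int) : Prop := out = min_umbrellas_alt weather
instance (weather : List String) (out : Int) : Decidable (Spec_min_umbrellas weather out) := by unfold Spec_min_umbrellas; infer_instance

-- ===== CLAIM (what is proved, stated in full; the proofs are below) =====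
def Claim_equal_min_umbrellas : Prop := ∀ (weather : List String), Dom_min_umbrellas weather → Pre_min_umbrellas weather → Spec_min_umbrellas weather (min_umbrellas weather)

-- ===== LEMMAS AND PROOFS =====

-- abstract count: one umbrella per rainy parity p that repeats the previous rainy parity (or starts the run)
def pvG : Option Int → List Int → Int
  | _, [] => 0
  | prev, p :: ps => (if prev = none ∨ prev = some p then 1 else 0) + pvG (some p) ps

-- index-threaded form of pvParities
def pvParFrom : List String → Nat → List Int
  | [], _ => []
  | w :: ws, i =>
    if PySem.Dict.getD pvConditionsB w 0 = 1 then ((i : Int) % 2) :: pvParFrom ws (i + 1)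
    else pvParFrom ws (i + 1)

theorem pvParities_eq_from : ∀ (ws : List String) (i : Nat),
    ((PySem.List.enumerate ws (i : Int)).filterMap
      (fun iw => if PySem.Dict.getD pvConditionsB iw.2 0 = 1 then some (iw.1 % 2) else none))
    = pvParFrom ws i := by
  intro ws
  induction ws with
  | nil => intro i; simp [PySem.List.enumerate_nil, pvParFrom]
  | cons w ws ih =>
    intro i
    rw [PySem.List.enumerate_cons]
    simp only [List.filterMap_cons, pvParFrom]
    split <;> simp_all [← ih (i + 1)]

-- A's loop computes nb + pvG prev (parities from i), with the flag invariant linking (home, work) to prev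
theorem pvLoopA_eq_pvG : ∀ (ws : List String) (i : Nat) (home work nb : Int) (prev : Option Int),
    (home = 0 ∧ work = 0 ∧ prev = none) ∨
    (home = 0 ∧ work = 1 ∧ prev = some 0) ∨
    (home = 1 ∧ work = 0 ∧ prev = some 1) →
    pvLoopA ws i home work nb = nb + pvG prev (pvParFrom ws i) := by
  intro ws
  induction ws with
  | nil => intro i home work nb prev _; simp [pvLoopA, pvParFrom, pvG]
  | cons w ws ih =>
    intro i home work nb prev hinv
    simp only [pvLoopA, pvParFrom]
    have hcB : pvConditionsB = pvConditionsA := rfl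
    rw [hcB]
    by_cases hc : PySem.Dict.getD pvConditionsA w 0 = 1
    · simp only [hc, if_true]
      by_cases hi : i % 2 = 0
      · have hp : (i : Int) % 2 = 0 := by omega
        rcases hinv with ⟨h1, h2, h3⟩ | ⟨h1, h2, h3⟩ | ⟨h1, h2, h3⟩ <;>
          subst h1 <;> subst h2 <;> subst h3 <;>
          simp only [hi, hp, if_true, pvG] <;> norm_num <;>
          rw [ih _ _ _ _ (some 0) (by norm_num)] <;> ((try simp) <;> (try ring))
      · have hi1 : i % 2 = 1 := Nat.mod_two_eq_zero_or_one i |>.resolve_left hi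
        have hp : (i : Int) % 2 = 1 := by omega
        rcases hinv with ⟨h1, h2, h3⟩ | ⟨h1, h2, h3⟩ | ⟨h1, h2, h3⟩ <;>
          subst h1 <;> subst h2 <;> subst h3 <;>
          simp only [hi, hp, if_false, pvG] <;> norm_num <;>
          rw [ih _ _ _ _ (some 1) (by norm_num)] <;> ((try simp) <;> (try ring))
    · simp only [hc, if_false]
      exact ih _ _ _ _ _ hinv

-- arithmetic stage of B equals pvG, threaded with the previous parity
theorem pvCount_some : ∀ (ps : List Int) (q : Int),
    ((ps.length : Int)) - (((q :: ps).zip ps).countP (fun ab => ab.1 != ab.2) : Int)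
      = pvG (some q) ps := by
  intro ps
  induction ps with
  | nil => intro q; simp [pvG]
  | cons p rest ih =>
    intro q
    simp only [List.zip_cons_cons, List.countP_cons, pvG, List.length_cons]
    rw [← ih p]
    by_cases h : q = p <;> simp [h] <;> try ring

theorem pvCount_none : ∀ (ps : List Int),
    ((ps.length : Int)) - ((ps.zip ps.tail).countP (fun ab => ab.1 != ab.2) : Int)
      = pvG none ps := by
  intro ps
  cases ps with
  | nil => simp [pvG]
  | cons p rest =>
    simp only [List.tail_cons, pvG, List.length_cons]
    rw [← pvCount_some rest p]
    simp
    ring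

-- ===== VERDICT (by name: the statement is the Claim_ definition above) =====
theorem min_umbrellas_spec : Claim_equal_min_umbrellas := by
  intro weather _ _
  show min_umbrellas weather = min_umbrellas_alt weather
  have hpar : pvParities weather = pvParFrom weather 0 := by
    simpa [pvParities] using pvParities_eq_from weather 0
  rw [min_umbrellas, pvLoopA_eq_pvG weather 0 0 0 0 none (Or.inl ⟨rfl, rfl, rfl⟩)]
  simp only [min_umbrellas_alt, hpar]
  rw [pvCount_none]
  ring
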